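-- pv_equiv track=rewrite | github.com/jcolinpatrick/kryptos | scripts/transposition/columnar/e_grid31_columnar_phase3.py | check_cribs_anywhere
-- ===== SOURCE A (Python) =====
-- from typing import Dict, List, Tuple
--
-- CRIB_STRINGS = ["EASTNORTHEAST", "BERLINCLOCK"]
--
-- def check_cribs_anywhere(text: str) -> List[Tuple[str, int]]:
--     found = []
--     for crib in CRIB_STRINGS:
--         idx = text.find(crib)
--         while idx != -1:
--             found.append((crib, idx))
--             idx = text.find(crib, idx + 1)
--     return found
-- ===== SOURCE B (Python) =====
-- from typing import Dict, List, Tuple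
--
-- CRIB_STRINGS = ["EASTNORTHEAST", "BERLINCLOCK"]
--
-- def check_cribs_anywhere(text: str) -> List[Tuple[str, int]]:
--     # Single pass over the text with a first-character dispatch index and
--     # per-crib buckets, flattened in CRIB_STRINGS order at the end.
--     by_first: Dict[str, List[str]] = {}
--     for crib in CRIB_STRINGS:
--         by_first.setdefault(crib[0], []).append(crib)
--     buckets: Dict[str, List[int]] = {crib: [] for crib in CRIB_STRINGS}
--     for i, ch in enumerate(text):
--         for crib in by_first.get(ch, []):
--             if text[i:i + len(crib)] == crib:
--                 buckets[crib].append(i)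
--     return [(crib, i) for crib in CRIB_STRINGS for i in buckets[crib]]
-- ===== Notes on version B (the rewrite author's own statement) =====
-- stated objective: alternative
-- what changed: Replaces the per-crib find/advance while-loops with one single pass over the text that uses a first-character dispatch index built once, collects matches into per-crib buckets, and flattens the buckets in CRIB_STRINGS order.
import Mathlib
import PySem

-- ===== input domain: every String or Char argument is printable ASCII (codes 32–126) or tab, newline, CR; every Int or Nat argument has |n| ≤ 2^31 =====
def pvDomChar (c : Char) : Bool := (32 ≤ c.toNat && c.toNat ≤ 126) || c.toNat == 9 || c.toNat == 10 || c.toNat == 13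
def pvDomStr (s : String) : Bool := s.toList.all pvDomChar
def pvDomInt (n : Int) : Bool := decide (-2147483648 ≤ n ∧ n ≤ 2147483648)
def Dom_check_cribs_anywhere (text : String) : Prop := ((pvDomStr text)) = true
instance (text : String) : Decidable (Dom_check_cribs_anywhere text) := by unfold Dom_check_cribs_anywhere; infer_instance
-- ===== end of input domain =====

-- B replaces A's per-crib find/advance while-loops by one single pass over the
-- text with a first-character dispatch index and per-crib buckets, flattened in
-- CRIB_STRINGS order; same return value, no speed claim.

def CRIB_STRINGS : List String := ["EASTNORTHEAST", "BERLINCLOCK"]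

-- ===== PORT A =====
-- the inner 'while idx != -1' loop; fuel = len(text)+1 always suffices since
-- each find result strictly increases (proved below, not assumed by the port)
def loopA (s crib : List Char) (name : String) : Nat → Int → List (String × Int) → List (String × Int)
  | 0, _, found => found
  | fuel + 1, idx, found =>
    if idx = -1 then found
    else loopA s crib name fuel (PySem.Chars.findFrom s crib (idx + 1) none) (found ++ [(name, idx)])

def check_cribs_anywhere (text : String) : List (String × Int) :=
  CRIB_STRINGS.foldl
    (fun found crib =>
      loopA text.toList crib.toList crib (text.toList.length + 1)
        (PySem.Chars.find text.toList crib.toList) found)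
    []

-- ===== PORT B =====
-- by_first.setdefault(crib[0], []).append(crib); cribs are nonempty literals, so
-- crib[0] is ported as headD (the default is never used)
def byFirst : PySem.Dict Char (List String) :=
  CRIB_STRINGS.foldl (fun d crib => d.modify (crib.toList.headD ' ') [] (· ++ [crib]))
    (PySem.Dict.mk [])

-- the body of the inner 'for crib in by_first.get(ch, [])' loop:
-- text[i:i+len(crib)] == crib compared as code-point lists (exact for str ==)
def stepInner (s : List Char) (p : Int × Char) (d : PySem.Dict String (List Int))
    (crib : String) : PySem.Dict String (List Int) :=
  if PySem.List.slice s (some p.1) (some (p.1 + (crib.toList.length : Int))) = crib.toList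
  then d.modify crib [] (· ++ [p.1]) else d

-- the body of 'for i, ch in enumerate(text)'
def stepOuter (s : List Char) (d : PySem.Dict String (List Int)) (p : Int × Char) :
    PySem.Dict String (List Int) :=
  (byFirst.getD p.2 []).foldl (stepInner s p) d

def check_cribs_anywhere_alt (text : String) : List (String × Int) :=
  let s := text.toList
  let buckets0 : PySem.Dict String (List Int) :=
    CRIB_STRINGS.foldl (fun d crib => d.insert crib []) (PySem.Dict.mk [])
  let buckets := (PySem.List.enumerate s 0).foldl (stepOuter s) buckets0
  CRIB_STRINGS.flatMap (fun crib => (buckets.getD crib []).map (fun i => (crib, i)))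

-- ===== PRECONDITION & SPEC =====
def Spec_check_cribs_anywhere (text : String) (out : List (String × Int)) : Prop := out = check_cribs_anywhere_alt text
instance (text : String) (out : List (String × Int)) : Decidable (Spec_check_cribs_anywhere text out) := by unfold Spec_check_cribs_anywhere; infer_instance

-- ===== CLAIM (what is proved, stated in full; the proofs are below) =====
def Claim_equal_check_cribs_anywhere : Prop := ∀ (text : String), Dom_check_cribs_anywhere text → Spec_check_cribs_anywhere text (check_cribs_anywhere text)

-- ===== LEMMAS AND PROOFS =====

-- ---- A side: A's fuelled find-loop produces the ascending occurrence list ----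

-- occurrences of crib in s at positions ≥ k, ascending
def occsFrom (s crib : List Char) (k : Nat) : List Nat :=
  (List.range (s.length + 1 - crib.length)).filter
    (fun i => decide (k ≤ i) && PySem.Chars.startswith (List.drop i s) crib)

lemma occsFrom_nil (s crib : List Char) (k : Nat)
    (h : ∀ i, k ≤ i → ¬ crib <+: s.drop i) : occsFrom s crib k = [] := by
  unfold occsFrom
  apply List.filter_eq_nil_iff.mpr
  intro i _
  simp [PySem.Chars.startswith_iff]
  intro hk
  exact fun hp => h i hk hp

lemma occsFrom_cons (s crib : List Char) (k m : Nat) (hcrib : crib ≠ [])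
    (hkm : k ≤ m) (hpref : crib <+: s.drop m)
    (hmin : ∀ i, k ≤ i → i < m → ¬ crib <+: s.drop i) :
    occsFrom s crib k = m :: occsFrom s crib (m + 1) := by
  have hmlen : m + crib.length ≤ s.length := by
    have h1 := hpref.length_le
    have h2 : (s.drop m).length = s.length - m := by simp
    have h3 : m ≤ s.length := by
      by_contra h
      push Not at h
      have : s.drop m = [] := List.drop_eq_nil_of_le (le_of_lt h)
      rw [this] at hpref
      exact hcrib (List.prefix_nil.mp hpref)
    omega
  have hclen : 1 ≤ crib.length := by
    cases crib with
    | nil => exact absurd rfl hcrib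
    | cons a l => simp
  have hmbound : m < s.length + 1 - crib.length := by omega
  unfold occsFrom
  obtain ⟨b, hb⟩ : ∃ b, s.length + 1 - crib.length = (m + 1) + b := ⟨s.length + 1 - crib.length - (m + 1), by omega⟩
  rw [hb, List.range_add, List.filter_append, List.filter_append]
  have hhead : (List.range (m + 1)).filter
      (fun i => decide (k ≤ i) && PySem.Chars.startswith (List.drop i s) crib) = [m] := by
    rw [List.range_succ, List.filter_append]
    have h1 : (List.range m).filter
        (fun i => decide (k ≤ i) && PySem.Chars.startswith (List.drop i s) crib) = [] := by
      apply List.filter_eq_nil_iff.mpr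
      intro i hi
      simp at hi
      simp [PySem.Chars.startswith_iff]
      intro hk
      exact fun hp => hmin i hk hi hp
    rw [h1]
    simp [PySem.Chars.startswith_iff, hkm, hpref]
  have h2 : (List.range (m + 1)).filter
      (fun i => decide (m + 1 ≤ i) && PySem.Chars.startswith (List.drop i s) crib) = [] := by
    apply List.filter_eq_nil_iff.mpr
    intro i hi
    simp at hi
    simp
    intro h
    omega
  have h3 : ∀ i ∈ (List.range b).map (fun x => m + 1 + x),
      (decide (k ≤ i) && PySem.Chars.startswith (List.drop i s) crib) =
      (decide (m + 1 ≤ i) && PySem.Chars.startswith (List.drop i s) crib) := by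
    intro i hi
    simp at hi
    obtain ⟨j, _, hj⟩ := hi
    have : k ≤ i ∧ m + 1 ≤ i := by omega
    simp [this.1, this.2]
  rw [hhead, h2, List.filter_congr h3]
  simp

lemma infix_drop_iff (s crib : List Char) (k : Nat) :
    crib <:+: s.drop k ↔ ∃ i, k ≤ i ∧ crib <+: s.drop i := by
  constructor
  · intro h
    have := (PySem.Chars.isIn_iff_infix (sub := crib) (s := s.drop k)).mpr h
    obtain ⟨j, hj⟩ := (PySem.Chars.exists_prefix_drop_iff_isIn (sub := crib) (s := s.drop k)).mpr this
    rw [List.drop_drop] at hj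
    exact ⟨k + j, by omega, hj⟩
  · rintro ⟨i, hki, hp⟩
    have : s.drop i = (s.drop k).drop (i - k) := by
      rw [List.drop_drop]
      congr 1
      omega
    rw [this] at hp
    have : PySem.Chars.isIn crib (s.drop k) = true :=
      (PySem.Chars.exists_prefix_drop_iff_isIn (sub := crib) (s := s.drop k)).mp ⟨i - k, hp⟩
    exact (PySem.Chars.isIn_iff_infix (sub := crib) (s := s.drop k)).mp this

lemma loopA_eq (s crib : List Char) (name : String) (hcrib : crib ≠ []) :
    ∀ (fuel k : Nat) (found : List (String × Int)), k ≤ s.length → s.length + 1 - k ≤ fuel →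
    loopA s crib name fuel (PySem.Chars.findFrom s crib (k : Int) none) found
      = found ++ (occsFrom s crib k).map (fun i => (name, (i : Int))) := by
  intro fuel
  induction fuel with
  | zero => intro k found hk hfuel; omega
  | succ f ih =>
    intro k found hk hfuel
    by_cases hfind : PySem.Chars.findFrom s crib (k : Int) none = -1
    · rw [hfind]
      unfold loopA
      rw [if_pos rfl]
      have hnone : ¬ crib <:+: s.drop k := (PySem.Chars.findFrom_natCast_eq_neg_one_iff s crib k hk).mp hfind
      have : occsFrom s crib k = [] := by
        apply occsFrom_nil
        intro i hki hp
        exact hnone ((infix_drop_iff s crib k).mpr ⟨i, hki, hp⟩)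
      rw [this]
      simp
    · obtain ⟨hle, hpref, hmin⟩ := PySem.Chars.findFrom_natCast_spec s crib k hk hfind
      set m : Int := PySem.Chars.findFrom s crib (k : Int) none with hm
      have hm0 : 0 ≤ m := le_trans (by exact_mod_cast Int.natCast_nonneg k) hle
      have hmnat : m = (m.toNat : Int) := (Int.toNat_of_nonneg hm0).symm
      have hkm : k ≤ m.toNat := by omega
      have hmlen : m.toNat + crib.length ≤ s.length := by
        have h1 := hpref.length_le
        have h2 : (s.drop m.toNat).length = s.length - m.toNat := by simp
        have hclen : 1 ≤ crib.length := List.length_pos_iff.mpr hcrib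
        have h3 : m.toNat ≤ s.length := by
          by_contra h
          push Not at h
          have : s.drop m.toNat = [] := List.drop_eq_nil_of_le (le_of_lt h)
          rw [this] at hpref
          exact hcrib (List.prefix_nil.mp hpref)
        omega
      have hclen : 1 ≤ crib.length := List.length_pos_iff.mpr hcrib
      unfold loopA
      rw [if_neg hfind]
      have hsucc : m + 1 = ((m.toNat + 1 : Nat) : Int) := by omega
      rw [hsucc]
      rw [ih (m.toNat + 1) (found ++ [(name, m)]) (by omega) (by omega)]
      have hocc : occsFrom s crib k = m.toNat :: occsFrom s crib (m.toNat + 1) := by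
        apply occsFrom_cons s crib k m.toNat hcrib hkm hpref
        intro i hki him hp
        exact hmin i (by exact_mod_cast Int.ofNat_le.mpr hki) (by omega) hp
      rw [hocc]
      simp [hmnat.symm]

lemma per_crib (s crib : List Char) (name : String) (hcrib : crib ≠ []) (found : List (String × Int)) :
    loopA s crib name (s.length + 1) (PySem.Chars.find s crib) found
      = found ++ (((List.range (s.length + 1 - crib.length)).filter
            (fun i => PySem.Chars.startswith (List.drop i s) crib)).map
          (fun i => (name, (i : Int)))) := by
  have h0 : PySem.Chars.find s crib = PySem.Chars.findFrom s crib ((0 : Nat) : Int) none := by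
    simp [PySem.Chars.findFrom_zero]
  rw [h0, loopA_eq s crib name hcrib (s.length + 1) 0 found (Nat.zero_le _) (by omega)]
  unfold occsFrom
  have h1 : ∀ i ∈ List.range (s.length + 1 - crib.length),
      (decide (0 ≤ i) && PySem.Chars.startswith (List.drop i s) crib)
        = PySem.Chars.startswith (List.drop i s) crib := by
    intro i _
    simp
  rw [List.filter_congr h1]

-- ---- B side: the bucket fold collects exactly the match positions per crib ----

-- positions recorded into the bucket of crib c (first char ch) by the events ps
def hitsB (s c : List Char) (ch : Char) (ps : List (Int × Char)) : List Int :=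
  (ps.filter (fun p => p.2 == ch &&
    decide (PySem.List.slice s (some p.1) (some (p.1 + (c.length : Int))) = c))).map (·.1)

lemma byFirst_eval : byFirst = PySem.Dict.mk [('E', ["EASTNORTHEAST"]), ('B', ["BERLINCLOCK"])] := by
  decide

lemma foldB_core (s : List Char) : ∀ (ps : List (Int × Char)) (l1 l2 : List Int),
    ps.foldl (stepOuter s) (PySem.Dict.mk [("EASTNORTHEAST", l1), ("BERLINCLOCK", l2)])
      = PySem.Dict.mk [("EASTNORTHEAST", l1 ++ hitsB s "EASTNORTHEAST".toList 'E' ps),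
                       ("BERLINCLOCK", l2 ++ hitsB s "BERLINCLOCK".toList 'B' ps)] := by
  intro ps
  induction ps with
  | nil => intro l1 l2; simp [hitsB]
  | cons p ps ih =>
    intro l1 l2
    have hgetD : ∀ (c : Char), byFirst.getD c [] =
        if c = 'E' then ["EASTNORTHEAST"] else if c = 'B' then ["BERLINCLOCK"] else [] := by
      intro c
      rw [byFirst_eval]
      by_cases h1 : c = 'E'
      · simp [h1, PySem.Dict.getD, PySem.Dict.get?]
      · by_cases h2 : c = 'B'
        · simp [h2, PySem.Dict.getD, PySem.Dict.get?]
        · simp [h1, h2, PySem.Dict.getD, PySem.Dict.get?, Ne.symm h1, Ne.symm h2]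
    have hstep : stepOuter s (PySem.Dict.mk [("EASTNORTHEAST", l1), ("BERLINCLOCK", l2)]) p =
        PySem.Dict.mk [
          ("EASTNORTHEAST", l1 ++ (if (p.2 == 'E' && decide (PySem.List.slice s (some p.1)
            (some (p.1 + (("EASTNORTHEAST".toList.length : Nat) : Int))) = "EASTNORTHEAST".toList))
            then [p.1] else [])),
          ("BERLINCLOCK", l2 ++ (if (p.2 == 'B' && decide (PySem.List.slice s (some p.1)
            (some (p.1 + (("BERLINCLOCK".toList.length : Nat) : Int))) = "BERLINCLOCK".toList))
            then [p.1] else []))] := by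
      unfold stepOuter stepInner
      rw [hgetD]
      by_cases hE : p.2 = 'E'
      · rw [if_pos hE, List.foldl_cons, List.foldl_nil]
        have hb2 : (p.2 == 'B' && decide (PySem.List.slice s (some p.1)
            (some (p.1 + (("BERLINCLOCK".toList.length : Nat) : Int))) = "BERLINCLOCK".toList)) = false := by
          rw [hE]
          simp
        rw [hb2]
        by_cases hsl : PySem.List.slice s (some p.1)
            (some (p.1 + (("EASTNORTHEAST".toList.length : Nat) : Int))) = "EASTNORTHEAST".toList
        · have hb1 : (p.2 == 'E' && decide (PySem.List.slice s (some p.1)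
              (some (p.1 + (("EASTNORTHEAST".toList.length : Nat) : Int))) = "EASTNORTHEAST".toList)) = true := by
            rw [hE, show ('E' == 'E') = true from rfl, Bool.true_and]
            exact decide_eq_true hsl
          rw [if_pos hsl, hb1]
          have hmod : (PySem.Dict.mk [("EASTNORTHEAST", l1), ("BERLINCLOCK", l2)]).modify
              "EASTNORTHEAST" [] (· ++ [p.1])
              = PySem.Dict.mk [("EASTNORTHEAST", l1 ++ [p.1]), ("BERLINCLOCK", l2)] := by
            simp [PySem.Dict.modify, PySem.Dict.get?, PySem.Dict.getD, PySem.Dict.insert]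
          rw [hmod]
          simp
        · have hb1 : (p.2 == 'E' && decide (PySem.List.slice s (some p.1)
              (some (p.1 + (("EASTNORTHEAST".toList.length : Nat) : Int))) = "EASTNORTHEAST".toList)) = false := by
            rw [hE, show ('E' == 'E') = true from rfl, Bool.true_and]
            exact decide_eq_false hsl
          rw [if_neg hsl, hb1]
          simp
      · rw [if_neg hE]
        have hb1 : (p.2 == 'E' && decide (PySem.List.slice s (some p.1)
            (some (p.1 + (("EASTNORTHEAST".toList.length : Nat) : Int))) = "EASTNORTHEAST".toList)) = false := by
          have : (p.2 == 'E') = false := by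
            simpa using hE
          rw [this]
          simp
        rw [hb1]
        by_cases hB : p.2 = 'B'
        · rw [if_pos hB, List.foldl_cons, List.foldl_nil]
          by_cases hsl : PySem.List.slice s (some p.1)
              (some (p.1 + (("BERLINCLOCK".toList.length : Nat) : Int))) = "BERLINCLOCK".toList
          · have hb2 : (p.2 == 'B' && decide (PySem.List.slice s (some p.1)
                (some (p.1 + (("BERLINCLOCK".toList.length : Nat) : Int))) = "BERLINCLOCK".toList)) = true := by
              rw [hB, show ('B' == 'B') = true from rfl, Bool.true_and]
              exact decide_eq_true hsl
            rw [if_pos hsl, hb2]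
            have hmod : (PySem.Dict.mk [("EASTNORTHEAST", l1), ("BERLINCLOCK", l2)]).modify
                "BERLINCLOCK" [] (· ++ [p.1])
                = PySem.Dict.mk [("EASTNORTHEAST", l1), ("BERLINCLOCK", l2 ++ [p.1])] := by
              simp [PySem.Dict.modify, PySem.Dict.get?, PySem.Dict.getD, PySem.Dict.insert]
            rw [hmod]
            simp
          · have hb2 : (p.2 == 'B' && decide (PySem.List.slice s (some p.1)
                (some (p.1 + (("BERLINCLOCK".toList.length : Nat) : Int))) = "BERLINCLOCK".toList)) = false := by
              rw [hB, show ('B' == 'B') = true from rfl, Bool.true_and]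
              exact decide_eq_false hsl
            rw [if_neg hsl, hb2]
            simp
        · have hb2 : (p.2 == 'B' && decide (PySem.List.slice s (some p.1)
              (some (p.1 + (("BERLINCLOCK".toList.length : Nat) : Int))) = "BERLINCLOCK".toList)) = false := by
            have : (p.2 == 'B') = false := by
              simpa using hB
            rw [this]
            simp
          rw [if_neg hB, hb2]
          simp
    rw [List.foldl_cons, hstep, ih]
    unfold hitsB
    simp only [List.filter_cons]
    split_ifs <;> simp

-- hitsB over the enumeration of s is the ascending filtered position list
lemma hitsB_enum (s c : List Char) (ch : Char) (hch : c.headD ' ' = ch) (hc : c ≠ []) :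
    ∀ (t : List Char) (k : Nat), s.drop k = t →
    hitsB s c ch (PySem.List.enumerate t (k : Int))
      = ((List.range' k t.length 1).filter
          (fun i => PySem.Chars.startswith (s.drop i) c)).map (fun i => ((i : Nat) : Int)) := by
  intro t
  induction t with
  | nil => intro k hk; simp [hitsB, PySem.List.enumerate_nil]
  | cons x t' ih =>
    intro k hk
    have ht' : s.drop (k + 1) = t' := by
      have h1 : s.drop (k + 1) = (s.drop k).drop 1 := by
        rw [List.drop_drop]
      rw [h1, hk]
      simp
    have hslice : PySem.List.slice s (some ((k : Nat) : Int)) (some (((k : Nat) : Int) + ((c.length : Nat) : Int)))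
        = (s.drop k).take c.length := PySem.List.slice_natCast_add s k c.length
    have hcast : ((k : Nat) : Int) + 1 = (((k + 1 : Nat)) : Int) := by push_cast; ring
    have htail := ih (k + 1) ht'
    rw [← hcast] at htail
    rw [PySem.List.enumerate_cons]
    unfold hitsB at htail ⊢
    by_cases hpre : c <+: s.drop k
    · have htake : (s.drop k).take c.length = c := (List.prefix_iff_eq_take.mp hpre).symm
      have hx : x = ch := by
        cases c with
        | nil => exact absurd rfl hc
        | cons c0 cs =>
          obtain ⟨r, hr⟩ := hpre
          rw [hk] at hr
          cases hr
          simpa using hch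
      have hsw : PySem.Chars.startswith (s.drop k) c = true := (PySem.Chars.startswith_iff _ _).mpr hpre
      have hdec : decide (PySem.List.slice s (some ((k : Nat) : Int))
          (some (((k : Nat) : Int) + ((c.length : Nat) : Int))) = c) = true := by
        rw [hslice, htake]
        simp
      simp [List.length_cons, List.range'_succ, hx, hdec, hsw, htail]
    · have hsw : PySem.Chars.startswith (s.drop k) c = false := by
        rw [Bool.eq_false_iff]
        intro h
        exact hpre ((PySem.Chars.startswith_iff _ _).mp h)
      have hdec : decide (PySem.List.slice s (some ((k : Nat) : Int))
          (some (((k : Nat) : Int) + ((c.length : Nat) : Int))) = c) = false := by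
        rw [hslice]
        have : ¬ (s.drop k).take c.length = c := by
          intro h
          exact hpre (List.prefix_iff_eq_take.mpr h.symm)
        simp [this]
      simp [List.length_cons, List.range'_succ, hdec, hsw, htail]

lemma filter_range_shrink (n m : Nat) (cond : Nat → Bool) (hmn : m ≤ n)
    (h : ∀ i, cond i = true → i < m) :
    (List.range n).filter cond = (List.range m).filter cond := by
  obtain ⟨b, hb⟩ : ∃ b, n = m + b := ⟨n - m, by omega⟩
  subst hb
  rw [List.range_add, List.filter_append]
  have : (List.map (fun x => m + x) (List.range b)).filter cond = [] := by
    apply List.filter_eq_nil_iff.mpr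
    intro i hi
    simp at hi
    obtain ⟨j, _, hj⟩ := hi
    intro hcond
    have := h i hcond
    omega
  rw [this, List.append_nil]

lemma flatMap_singleton_map {α β : Type} (l : List α) (f : α → β) :
    List.flatMap (fun a => [f a]) l = l.map f := by
  induction l with
  | nil => simp
  | cons a l ih => simp [ih]

-- the B-side bucket list for one crib equals the A-side occurrence list
lemma bucket_eq (s c : List Char) (ch : Char) (hch : c.headD ' ' = ch) (hc : c ≠ []) :
    hitsB s c ch (PySem.List.enumerate s 0)
      = ((List.range (s.length + 1 - c.length)).filter
          (fun i => PySem.Chars.startswith (s.drop i) c)).map (fun i => ((i : Nat) : Int)) := by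
  have h := hitsB_enum s c ch hch hc s 0 (by simp)
  rw [show ((0 : Nat) : Int) = 0 by simp] at h
  rw [h, show List.range' 0 s.length 1 = List.range s.length from List.range_eq_range'.symm]
  have hclen : 1 ≤ c.length := List.length_pos_iff.mpr hc
  congr 1
  apply filter_range_shrink _ _ _ (by omega)
  intro i hi
  have hpref : c <+: s.drop i := (PySem.Chars.startswith_iff _ _).mp hi
  have h1 := hpref.length_le
  have h2 : (s.drop i).length = s.length - i := by simp
  have h3 : i ≤ s.length := by
    by_contra h
    push Not at h
    have : s.drop i = [] := List.drop_eq_nil_of_le (le_of_lt h)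
    rw [this] at hpref
    exact hc (List.prefix_nil.mp hpref)
  omega

-- ===== VERDICT (by name: the statement is the Claim_ definition above) =====
theorem check_cribs_anywhere_spec : Claim_equal_check_cribs_anywhere := by
  intro text _
  unfold Spec_check_cribs_anywhere check_cribs_anywhere check_cribs_anywhere_alt CRIB_STRINGS
  simp only [List.foldl_cons, List.foldl_nil, List.flatMap_cons, List.flatMap_nil]
  rw [per_crib _ _ _ (by decide), per_crib _ _ _ (by decide)]
  have hD : ((PySem.Dict.mk [] : PySem.Dict String (List Int)).insert "EASTNORTHEAST" []).insert "BERLINCLOCK" []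
      = PySem.Dict.mk [("EASTNORTHEAST", []), ("BERLINCLOCK", [])] := by decide
  rw [hD]
  rw [foldB_core]
  rw [bucket_eq text.toList "EASTNORTHEAST".toList 'E' (by decide) (by decide)]
  rw [bucket_eq text.toList "BERLINCLOCK".toList 'B' (by decide) (by decide)]
  simp [PySem.Dict.getD, PySem.Dict.get?, Function.comp_def, flatMap_singleton_map]
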